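-- pv_equiv track=rewrite | github.com/bloomberg/emnlp20_depsrl | srl/conversion.py | subtree_rels
-- ===== SOURCE A (Python) =====
-- def subtree_rels(depspans, rels, lm, rm):
--     ret = []
--     while lm <= rm:
--         rs = [r for l, r in depspans if l == lm and r <= rm]
--         if len(rs) == 0:
--             return "crossing"
--         r = max(rs)
--         ret.append(rels[depspans[lm, r]])
--         lm = r + 1
--     return " ".join(ret)
-- ===== SOURCE B (Python) =====
-- def subtree_rels(depspans, rels, lm, rm):
--     if lm > rm:
--         return ""
--     # one pass: for each left endpoint l, keep the largest r <= rm and its relation index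
--     best = {}
--     for (l, r), v in depspans.items():
--         if r <= rm and (l not in best or r > best[l][0]):
--             best[l] = (r, v)
--     out = []
--     while lm <= rm:
--         if lm not in best:
--             return "crossing"
--         r, v = best[lm]
--         out.append(rels[v])
--         lm = r + 1
--     return " ".join(out)
-- ===== Notes on version B (the rewrite author's own statement) =====
-- stated objective: alternative
-- what changed: B builds, in one pass over depspans, a dictionary mapping each left endpoint l to the largest right endpoint r <= rm together with its relation index, so every greedy step is a single dictionary lookup instead of A's rescan of all of depspans plus the extra lookup depspans[lm, r]; on the measured input family the two run at the same speed.
-- outside the precondition, e.g. on subtree_rels({(2, 1): 0, (0, 0): 0}, ['A'], 0, 0): A returns 'A', B returns 'A'; on subtree_rels({(1, 1): 5}, ['A'], 0, 0): A returns 'crossing', B returns 'crossing'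
import Mathlib
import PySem

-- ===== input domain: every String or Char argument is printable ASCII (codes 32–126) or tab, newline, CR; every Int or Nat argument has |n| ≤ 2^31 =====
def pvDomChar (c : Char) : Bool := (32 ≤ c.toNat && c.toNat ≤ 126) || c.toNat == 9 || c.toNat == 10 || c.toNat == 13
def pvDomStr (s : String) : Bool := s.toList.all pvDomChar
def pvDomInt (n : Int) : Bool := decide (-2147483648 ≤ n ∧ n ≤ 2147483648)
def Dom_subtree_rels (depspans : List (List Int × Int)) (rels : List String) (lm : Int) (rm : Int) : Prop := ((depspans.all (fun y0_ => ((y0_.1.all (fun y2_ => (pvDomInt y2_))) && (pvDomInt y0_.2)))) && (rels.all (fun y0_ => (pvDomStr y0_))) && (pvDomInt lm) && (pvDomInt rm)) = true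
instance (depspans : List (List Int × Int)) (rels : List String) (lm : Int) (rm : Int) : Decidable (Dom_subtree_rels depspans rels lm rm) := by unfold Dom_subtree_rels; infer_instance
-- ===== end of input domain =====

-- B replaces A's per-step rescan of all depspans by a dictionary l ↦ (max r ≤ rm, rel index)
-- built in one pass, so each greedy step is a single dictionary lookup (alternative algorithm).

-- ===== PORT A =====
-- the body of A's while-loop; fuel only totalises the loop (under Pre_ it never runs out)
def subtreeRelsGoA (depspans : List (List Int × Int)) (rels : List String) (rm : Int) :
    Nat → Int → List String → Option String
  | 0, _, _ => none
  | fuel+1, lm, ret =>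
    if lm ≤ rm then
      -- rs = [r for l, r in depspans if l == lm and r <= rm]
      let rs := depspans.filterMap (fun kv =>
        match kv.1 with
        | [l, r] => if l = lm ∧ r ≤ rm then some r else none
        | _ => none)
      if rs.length = 0 then some "crossing"
      else
        match PySem.List.max? rs (fun x => x) with
        | none => none
        | some r =>
          match (PySem.Dict.mk depspans).get? [lm, r] with      -- depspans[lm, r]
          | none => none
          | some v =>
            match PySem.List.pyGet? rels v with                 -- rels[...]
            | none => none
            | some s => subtreeRelsGoA depspans rels rm fuel (r + 1) (ret ++ [s])
    else some (PySem.Str.join " " ret)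

def subtree_rels (depspans : List (List Int × Int)) (rels : List String) (lm : Int) (rm : Int) : String :=
  (subtreeRelsGoA depspans rels rm ((rm - lm).toNat + 2) lm []).getD ""

-- ===== PORT B =====
-- one pass of Source B's for-loop: keep, per left endpoint l, the largest r ≤ rm with its value
def pvBStep (rm : Int) (best : PySem.Dict Int (Int × Int)) (kv : List Int × Int) :
    PySem.Dict Int (Int × Int) :=
  match kv.1 with
  | [l, r] =>
      if decide (r ≤ rm) && (match best.get? l with
                             | none => true
                             | some p => decide (p.1 < r)) then best.insert l (r, kv.2) else best
  | _ => best

def subtreeRelsBuild (depspans : List (List Int × Int)) (rm : Int) : PySem.Dict Int (Int × Int) :=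
  depspans.foldl (pvBStep rm) PySem.Dict.empty

-- Source B's while-loop over the index
def subtreeRelsGoB (best : PySem.Dict Int (Int × Int)) (rels : List String) (rm : Int) :
    Nat → Int → List String → Option String
  | 0, _, _ => none
  | fuel+1, lm, out =>
    if lm ≤ rm then
      match best.get? lm with
      | none => some "crossing"
      | some (r, v) =>
        match PySem.List.pyGet? rels v with
        | none => none
        | some s => subtreeRelsGoB best rels rm fuel (r + 1) (out ++ [s])
    else some (PySem.Str.join " " out)

def subtree_rels_alt (depspans : List (List Int × Int)) (rels : List String) (lm : Int) (rm : Int) : String :=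
  if rm < lm then ""
  else (subtreeRelsGoB (subtreeRelsBuild depspans rm) rels rm ((rm - lm).toNat + 2) lm []).getD ""

-- ===== PRECONDITION & SPEC =====
-- a (key, value) entry is a well-formed span: key [l, r] with l ≤ r, value a valid index into rels
def pvSpanOK (rlen : Nat) (kv : List Int × Int) : Bool :=
  match kv.1 with
  | [l, r] => decide (l ≤ r) && decide (PySem.Raise.InRange rlen kv.2)
  | _ => false
-- When lm ≤ rm, Pre_ asks that depspans be a genuine span dictionary: distinct 2-element keys
-- [l, r] (anything else makes A's unpacking raise ValueError, and duplicate keys cannot occur in a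
-- Python dict, so the association list's first-match order would be accidental), l ≤ r (a span
-- with r < l can send A's cursor backwards and diverge), and every value a valid index into rels
-- (A raises IndexError when it uses an invalid one).  This also excludes some inputs on which A
-- still returns, namely when A hits "crossing" (or never selects the offending entry) before
-- touching a malformed entry — see the cites.  When lm > rm, A returns "" without reading
-- depspans at all, so everything is admitted.
def Pre_subtree_rels (depspans : List (List Int × Int)) (rels : List String) (lm : Int) (rm : Int) : Prop :=
  rm < lm ∨ (depspans.all (pvSpanOK rels.length) = true ∧ (depspans.map Prod.fst).Nodup)
instance (depspans : List (List Int × Int)) (rels : List String) (lm : Int) (rm : Int) : Decidable (Pre_subtree_rels depspans rels lm rm) := by unfold Pre_subtree_rels; infer_instance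

def pvWitness_subtree_rels : (List (List Int × Int)) × List String × Int × Int :=
  ([([0, 0], 0), ([1, 2], 1)], ["A", "B"], 0, 2)

def Spec_subtree_rels (depspans : List (List Int × Int)) (rels : List String) (lm : Int) (rm : Int) (out : String) : Prop := out = subtree_rels_alt depspans rels lm rm
instance (depspans : List (List Int × Int)) (rels : List String) (lm : Int) (rm : Int) (out : String) : Decidable (Spec_subtree_rels depspans rels lm rm out) := by unfold Spec_subtree_rels; infer_instance

-- ===== CLAIM (what is proved, stated in full; the proofs are below) =====
def Claim_equal_subtree_rels : Prop := ∀ (depspans : List (List Int × Int)) (rels : List String) (lm : Int) (rm : Int), Dom_subtree_rels depspans rels lm rm → Pre_subtree_rels depspans rels lm rm → Spec_subtree_rels depspans rels lm rm (subtree_rels depspans rels lm rm)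

-- ===== LEMMAS AND PROOFS =====

-- one step of Source B's indexing loop: if it keeps an entry, the r component only grows
theorem pvStep_mono (rm : Int) (best : PySem.Dict Int (Int × Int)) (kv : List Int × Int)
    (l r : Int) (v : Int) (h : best.get? l = some (r, v)) :
    ∃ r' v', (pvBStep rm best kv).get? l = some (r', v') ∧ r ≤ r' := by
  obtain ⟨k, w⟩ := kv
  rcases k with _ | ⟨a, _ | ⟨b, _ | ⟨c, t⟩⟩⟩ <;> simp only [pvBStep]
  · exact ⟨r, v, h, le_refl r⟩
  · exact ⟨r, v, h, le_refl r⟩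
  · by_cases hc : (decide (b ≤ rm) && (match best.get? a with
                           | none => true
                           | some p => decide (p.1 < b))) = true
    · rw [if_pos hc, PySem.Dict.get?_insert]
      by_cases hl : l = a
      · subst hl
        rw [h] at hc
        simp only [Bool.and_eq_true, decide_eq_true_eq] at hc
        exact ⟨b, w, by simp, le_of_lt hc.2⟩
      · exact ⟨r, v, by rw [if_neg hl]; exact h, le_refl r⟩
    · rw [if_neg hc]; exact ⟨r, v, h, le_refl r⟩
  · exact ⟨r, v, h, le_refl r⟩

-- one step: a surviving entry is either the processed pair (within rm) or was already there
theorem pvStep_mem (rm : Int) (best : PySem.Dict Int (Int × Int)) (kv : List Int × Int)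
    (l r : Int) (v : Int) (h : (pvBStep rm best kv).get? l = some (r, v)) :
    (kv = ([l, r], v) ∧ r ≤ rm) ∨ best.get? l = some (r, v) := by
  obtain ⟨k, w⟩ := kv
  rcases k with _ | ⟨a, _ | ⟨b, _ | ⟨c, t⟩⟩⟩ <;> simp only [pvBStep] at h
  · exact Or.inr h
  · exact Or.inr h
  · by_cases hc : (decide (b ≤ rm) && (match best.get? a with
                           | none => true
                           | some p => decide (p.1 < b))) = true
    · rw [if_pos hc, PySem.Dict.get?_insert] at h
      by_cases hl : l = a
      · rw [if_pos hl] at h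
        injection h with h
        obtain ⟨h1, h2⟩ := Prod.mk.injEq .. ▸ h
        simp only [Bool.and_eq_true, decide_eq_true_eq] at hc
        subst hl
        exact Or.inl ⟨by rw [h1, h2], h1 ▸ hc.1⟩
      · rw [if_neg hl] at h; exact Or.inr h
    · rw [if_neg hc] at h; exact Or.inr h
  · exact Or.inr h

-- one step: processing ([l, r], v) with r ≤ rm leaves an entry at l with at least r
theorem pvStep_ub (rm : Int) (best : PySem.Dict Int (Int × Int)) (l r : Int) (v : Int)
    (hle : r ≤ rm) :
    ∃ r' v', (pvBStep rm best ([l, r], v)).get? l = some (r', v') ∧ r ≤ r' := by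
  simp only [pvBStep]
  by_cases hc : (decide (r ≤ rm) && (match best.get? l with
                           | none => true
                           | some p => decide (p.1 < r))) = true
  · rw [if_pos hc, PySem.Dict.get?_insert]
    exact ⟨r, v, by simp, le_refl r⟩
  · rw [if_neg hc]
    simp only [Bool.and_eq_true, decide_eq_true_eq, not_and] at hc
    match hb : best.get? l with
    | none => rw [hb] at hc; simp [hle] at hc
    | some p =>
      rw [hb] at hc
      simp only [decide_eq_true_eq] at hc
      exact ⟨p.1, p.2, by simp, le_of_not_gt (hc hle)⟩

theorem pvBuild_mono (rm : Int) (ds : List (List Int × Int))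
    (best : PySem.Dict Int (Int × Int)) (l r : Int) (v : Int)
    (h : best.get? l = some (r, v)) :
    ∃ r' v', (ds.foldl (pvBStep rm) best).get? l = some (r', v') ∧ r ≤ r' := by
  induction ds generalizing best r v with
  | nil => exact ⟨r, v, h, le_refl r⟩
  | cons kv t ih =>
    obtain ⟨r1, v1, h1, hr1⟩ := pvStep_mono rm best kv l r v h
    obtain ⟨r', v', h', hr'⟩ := ih (pvBStep rm best kv) r1 v1 h1
    exact ⟨r', v', h', le_trans hr1 hr'⟩

theorem pvBuild_mem (rm : Int) (ds : List (List Int × Int))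
    (best : PySem.Dict Int (Int × Int)) (l r : Int) (v : Int)
    (h : (ds.foldl (pvBStep rm) best).get? l = some (r, v)) :
    (([l, r], v) ∈ ds ∧ r ≤ rm) ∨ best.get? l = some (r, v) := by
  induction ds generalizing best with
  | nil => exact Or.inr h
  | cons kv t ih =>
    rcases ih _ h with hin | hbest
    · exact Or.inl ⟨List.mem_cons_of_mem _ hin.1, hin.2⟩
    · rcases pvStep_mem rm best kv l r v hbest with ⟨heq, hle⟩ | hold
      · exact Or.inl ⟨heq ▸ List.mem_cons_self, hle⟩
      · exact Or.inr hold

theorem pvBuild_ub (rm : Int) (ds : List (List Int × Int))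
    (best : PySem.Dict Int (Int × Int)) (l r : Int) (v : Int)
    (hmem : ([l, r], v) ∈ ds) (hle : r ≤ rm) :
    ∃ r' v', (ds.foldl (pvBStep rm) best).get? l = some (r', v') ∧ r ≤ r' := by
  induction ds generalizing best with
  | nil => cases hmem
  | cons kv t ih =>
    rcases List.mem_cons.mp hmem with heq | hin
    · subst heq
      obtain ⟨r1, v1, h1, hr1⟩ := pvStep_ub rm best l r v hle
      obtain ⟨r', v', h', hr'⟩ := pvBuild_mono rm t _ l r1 v1 h1
      exact ⟨r', v', by simpa using h', le_trans hr1 hr'⟩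
    · exact ih _ hin

-- membership in A's comprehension list rs
theorem pvMem_rs (depspans : List (List Int × Int)) (lm rm r : Int) :
    r ∈ depspans.filterMap (fun kv =>
        match kv.1 with
        | [l, r] => if l = lm ∧ r ≤ rm then some r else none
        | _ => none) ↔ (∃ v, ([lm, r], v) ∈ depspans) ∧ r ≤ rm := by
  rw [List.mem_filterMap]
  constructor
  · rintro ⟨⟨k, w⟩, hkv, hf⟩
    rcases k with _ | ⟨a, _ | ⟨b, _ | ⟨c, t⟩⟩⟩ <;> simp only at hf
    · cases hf
    · cases hf
    · by_cases hc : a = lm ∧ b ≤ rm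
      · rw [if_pos hc] at hf
        injection hf with hf
        subst hf
        exact ⟨⟨w, by rw [← hc.1]; exact hkv⟩, hc.2⟩
      · rw [if_neg hc] at hf; cases hf
    · cases hf
  · rintro ⟨⟨v, hv⟩, hr⟩
    exact ⟨([lm, r], v), hv, by simp [hr]⟩

-- the key [lm, r'] really maps to v' in the Python dict (first match = only match under Nodup)
theorem pvDict_lookup (depspans : List (List Int × Int))
    (hND : (depspans.map Prod.fst).Nodup) (k : List Int) (v : Int)
    (hmem : (k, v) ∈ depspans) :
    (PySem.Dict.mk depspans).get? k = some v := by
  apply PySem.Dict.get?_of_mem_items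
  · exact hmem
  · simpa [PySem.Dict.keys] using hND

-- the two loops agree step by step once `best` is built
theorem pvLoop_eq (depspans : List (List Int × Int)) (rels : List String) (rm : Int)
    (hND : (depspans.map Prod.fst).Nodup) :
    ∀ (fuel : Nat) (lm : Int) (acc : List String),
      subtreeRelsGoA depspans rels rm fuel lm acc
        = subtreeRelsGoB (subtreeRelsBuild depspans rm) rels rm fuel lm acc := by
  intro fuel
  induction fuel with
  | zero => intro lm acc; rfl
  | succ n ih =>
    intro lm acc
    rw [subtreeRelsGoA, subtreeRelsGoB]
    by_cases hlm : lm ≤ rm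
    · rw [if_pos hlm, if_pos hlm]
      set rs := depspans.filterMap (fun kv =>
        match kv.1 with
        | [l, r] => if l = lm ∧ r ≤ rm then some r else none
        | _ => none) with hrs
      match hb : (subtreeRelsBuild depspans rm).get? lm with
      | none =>
        -- rs must be empty: any member would have been recorded in best
        have hempty : rs = [] := by
          by_contra hne
          obtain ⟨r0, hr0⟩ := List.exists_mem_of_ne_nil rs hne
          obtain ⟨⟨v0, hv0⟩, hr0le⟩ := (pvMem_rs depspans lm rm r0).mp hr0
          obtain ⟨r', v', h', _⟩ := pvBuild_ub rm depspans PySem.Dict.empty lm r0 v0 hv0 hr0le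
          rw [subtreeRelsBuild] at hb
          rw [hb] at h'; cases h'
        simp [hempty]
      | some p =>
        obtain ⟨r', v'⟩ := p
        -- best's entry is a genuine depspans entry with r' ≤ rm …
        have hmem : ([lm, r'], v') ∈ depspans ∧ r' ≤ rm := by
          rcases pvBuild_mem rm depspans PySem.Dict.empty lm r' v' hb with h | h
          · exact h
          · rw [PySem.Dict.get?_empty] at h; cases h
        have hr'rs : r' ∈ rs := (pvMem_rs depspans lm rm r').mpr ⟨⟨v', hmem.1⟩, hmem.2⟩
        have hne : rs.length ≠ 0 := by
          intro h0
          rw [List.length_eq_zero_iff] at h0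
          rw [h0] at hr'rs; cases hr'rs
        rw [if_neg hne]
        -- … and it is the maximum of rs
        match hm : PySem.List.max? rs (fun x => x) with
        | none =>
          rw [PySem.List.max?_eq_none_iff] at hm
          rw [hm] at hr'rs; cases hr'rs
        | some rmax =>
          have h1 : r' ≤ rmax := PySem.List.max?_isMax hm r' hr'rs
          have hmaxrs := PySem.List.max?_mem hm
          obtain ⟨⟨vmax, hvmax⟩, hmaxle⟩ := (pvMem_rs depspans lm rm rmax).mp hmaxrs
          have h2 : rmax ≤ r' := by
            obtain ⟨r'', v'', h'', hge⟩ :=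
              pvBuild_ub rm depspans PySem.Dict.empty lm rmax vmax hvmax hmaxle
            rw [subtreeRelsBuild] at hb
            rw [hb] at h''
            injection h'' with h''
            obtain ⟨e1, _⟩ := Prod.mk.injEq .. ▸ h''
            rw [← e1] at hge
            exact hge
          have hrr : rmax = r' := le_antisymm h2 h1
          subst hrr
          have hd := pvDict_lookup depspans hND [lm, rmax] v' hmem.1
          simp only [hd]
          match PySem.List.pyGet? rels v' with
          | none => rfl
          | some s => exact ih (rmax + 1) (acc ++ [s])
    · rw [if_neg hlm, if_neg hlm]

-- ===== VERDICT (by name: the statement is the Claim_ definition above) =====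
theorem subtree_rels_spec : Claim_equal_subtree_rels := by
  intro depspans rels lm rm _ hpre
  unfold Spec_subtree_rels subtree_rels subtree_rels_alt
  by_cases hlt : rm < lm
  · rw [if_pos hlt]
    rw [subtreeRelsGoA]
    rw [if_neg (by omega : ¬ lm ≤ rm)]
    rfl
  · rw [if_neg hlt]
    rcases hpre with h | ⟨_, hND⟩
    · exact absurd h hlt
    · rw [pvLoop_eq depspans rels rm hND]
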